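-- pv_equiv track=rewrite | github.com/FredrikAkerblom/aoc_2024 | aoc_2024/Day14/Day14.py | has_many_adjacent
-- ===== SOURCE A (Python) =====
-- def has_many_adjacent(px, py, width):
--     space = set()
--     for i in range(len(px)):
--         space.add((px[i], py[i]))
--     for tile in space:
--         line_length = 0
--         for x in range(tile[0], width):
--             if (x, tile[1]) in space and (x, tile[1] - 1) in space and (x, tile[1] + 1) in space:
--                 line_length += 1
--                 if line_length > 5:
--                     return True
--             else:
--                 break
--     return False
-- ===== SOURCE B (Python) =====
-- def has_many_adjacent(px, py, width):
--     rows = {}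
--     for x, y in zip(px, py):
--         rows.setdefault(y, set()).add(x)
--     empty = set()
--     for y, xs in rows.items():
--         cols = sorted(x for x in xs
--                       if x < width
--                       and x in rows.get(y - 1, empty)
--                       and x in rows.get(y + 1, empty))
--         run, prev = 0, None
--         for x in cols:
--             run = run + 1 if prev is not None and x == prev + 1 else 1
--             if run >= 6:
--                 return True
--             prev = x
--     return False
-- ===== Notes on version B (the rewrite author's own statement) =====
-- stated objective: alternative
-- what changed: A scans rightward from every tile toward width with a break-and-counter loop, testing the three-row membership at each step; B instead buckets the points by row into a dict of column-sets, filters each row to the columns whose vertical neighbours are present, sorts that column list and detects a run of 6 consecutive integers by a single prev/run sweep - no per-tile scan and no membership test during the sweep.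
import Mathlib
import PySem

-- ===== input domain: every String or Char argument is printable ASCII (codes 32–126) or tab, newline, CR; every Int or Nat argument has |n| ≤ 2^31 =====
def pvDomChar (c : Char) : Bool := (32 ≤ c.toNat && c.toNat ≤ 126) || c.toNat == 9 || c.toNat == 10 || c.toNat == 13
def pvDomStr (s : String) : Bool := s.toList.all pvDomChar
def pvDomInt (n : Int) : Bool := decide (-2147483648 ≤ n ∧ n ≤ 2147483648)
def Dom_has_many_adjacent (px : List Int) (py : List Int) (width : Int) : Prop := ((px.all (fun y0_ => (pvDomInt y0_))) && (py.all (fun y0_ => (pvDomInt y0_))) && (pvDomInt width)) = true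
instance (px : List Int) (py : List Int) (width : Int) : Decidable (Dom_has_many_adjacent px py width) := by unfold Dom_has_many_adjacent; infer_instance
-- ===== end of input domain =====

-- B replaces A's per-tile rightward scan-with-break-and-counter by: bucket the points by
-- row into a dict of column sets, intersect each row with its two vertical neighbours,
-- sort the surviving columns and sweep once for a run of 6 consecutive integers.
-- Objective: alternative decomposition, same result, similar cost.

-- ===== PORT A =====
-- inner loop: 'for x in range(tile[0], width): … line_length += 1 / break / return True';
-- ported lazily (x increases while x < width) so huge widths are not materialised; exact.
def pvScanA (space : PySem.Set (Int × Int)) (y : Int) (x w : Int) (n : Int) : Bool :=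
  if x < w then
    if PySem.Set.contains space (x, y) && PySem.Set.contains space (x, y - 1)
        && PySem.Set.contains space (x, y + 1) then
      if n + 1 > 5 then true else pvScanA space y (x + 1) w (n + 1)
    else false
  else false
termination_by (w - x).toNat
decreasing_by omega

def has_many_adjacent (px : List Int) (py : List Int) (width : Int) : Bool :=
  let space := (PySem.List.pyRange 0 (px.length : Int) 1).foldl
      (fun s i => PySem.Set.add s (PySem.List.pyGetD px i 0, PySem.List.pyGetD py i 0))
      PySem.Set.empty
  space.any (fun tile => pvScanA space tile.2 tile.1 width 0)

-- ===== PORT B =====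
-- 'rows.setdefault(y, set()).add(x)' is rows[y] = rows.get(y, set()) ∪ {x} in place = Dict.modify
def pvRows (px : List Int) (py : List Int) : PySem.Dict Int (PySem.Set Int) :=
  (px.zip py).foldl
    (fun d p => d.modify p.2 PySem.Set.empty (fun s => PySem.Set.add s p.1))
    PySem.Dict.empty

-- the prev/run sweep over the sorted column list ('for x in cols: …; return True at run 6')
def pvRunScan : List Int → Int → Option Int → Bool
  | [], _, _ => false
  | x :: rest, run, prev =>
    let run' := match prev with
      | some p => if x == p + 1 then run + 1 else 1
      | none => 1
    if run' ≥ 6 then true else pvRunScan rest run' (some x)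

def has_many_adjacent_alt (px : List Int) (py : List Int) (width : Int) : Bool :=
  let rows := pvRows px py
  rows.items.any (fun it =>
    let y := it.1
    let cols := PySem.List.sorted (it.2.filter (fun x =>
        decide (x < width)
          && PySem.Set.contains (rows.getD (y - 1) PySem.Set.empty) x
          && PySem.Set.contains (rows.getD (y + 1) PySem.Set.empty) x))
      (fun x => x) false
    pvRunScan cols 0 none)

-- ===== PRECONDITION & SPEC =====
-- Pre_ excludes exactly the inputs where A raises IndexError (py shorter than px, so py[i]
-- fails while building the point set); A returns on every input satisfying Pre_.
def Pre_has_many_adjacent (px : List Int) (py : List Int) (width : Int) : Prop :=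
  px.length ≤ py.length
instance (px : List Int) (py : List Int) (width : Int) : Decidable (Pre_has_many_adjacent px py width) := by unfold Pre_has_many_adjacent; infer_instance
def pvWitness_has_many_adjacent : List Int × List Int × Int := ([0], [0], 5)

def Spec_has_many_adjacent (px : List Int) (py : List Int) (width : Int) (out : Bool) : Prop := out = has_many_adjacent_alt px py width
instance (px : List Int) (py : List Int) (width : Int) (out : Bool) : Decidable (Spec_has_many_adjacent px py width out) := by unfold Spec_has_many_adjacent; infer_instance

-- ===== CLAIM (what is proved, stated in full; the proofs are below) =====
def Claim_equal_has_many_adjacent : Prop := ∀ (px : List Int) (py : List Int) (width : Int), Dom_has_many_adjacent px py width → Pre_has_many_adjacent px py width → Spec_has_many_adjacent px py width (has_many_adjacent px py width)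

-- ===== LEMMAS AND PROOFS =====

-- the triple condition of A's inner test, as a Prop over the zipped point list
def pvTriple (S : List (Int × Int)) (x y : Int) : Prop :=
  (x, y) ∈ S ∧ (x, y - 1) ∈ S ∧ (x, y + 1) ∈ S

lemma pvScanA_iff (S : PySem.Set (Int × Int)) (y w : Int) :
    ∀ (m : Nat), m ≤ 5 → ∀ x : Int,
      (pvScanA S y x w (5 - (m : Int)) = true ↔
        (x + m < w ∧ ∀ k : Nat, k ≤ m → pvTriple S (x + k) y)) := by
  intro m
  induction m with
  | zero =>
    intro _ x
    rw [pvScanA]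
    by_cases hx : x < w
    · by_cases ht : pvTriple S x y
      · have hb : (PySem.Set.contains S (x, y) && PySem.Set.contains S (x, y - 1)
            && PySem.Set.contains S (x, y + 1)) = true := by
          simp only [Bool.and_eq_true, PySem.Set.contains_iff]
          exact ⟨⟨ht.1, ht.2.1⟩, ht.2.2⟩
        rw [if_pos hx, if_pos hb, if_pos (by norm_num)]
        constructor
        · intro _
          refine ⟨by push_cast; omega, ?_⟩
          intro k hk
          interval_cases k
          simpa using ht
        · intro _; rfl
      · have hb : ¬ ((PySem.Set.contains S (x, y) && PySem.Set.contains S (x, y - 1)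
            && PySem.Set.contains S (x, y + 1)) = true) := by
          simp only [Bool.and_eq_true, PySem.Set.contains_iff]
          intro hc; exact ht ⟨hc.1.1, hc.1.2, hc.2⟩
        rw [if_pos hx, if_neg hb]
        constructor
        · intro h; simp at h
        · rintro ⟨_, h2⟩
          exact absurd (by simpa using h2 0 (by omega)) ht
    · rw [if_neg hx]
      constructor
      · intro h; simp at h
      · rintro ⟨h1, _⟩
        exact absurd (by push_cast at h1; omega : x < w) hx
  | succ m ih =>
    intro hm x
    rw [pvScanA]
    have hn1 : (5 - ((m + 1 : Nat) : Int)) + 1 = 5 - (m : Int) := by push_cast; ring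
    by_cases hx : x < w
    · by_cases ht : pvTriple S x y
      · have hb : (PySem.Set.contains S (x, y) && PySem.Set.contains S (x, y - 1)
            && PySem.Set.contains S (x, y + 1)) = true := by
          simp only [Bool.and_eq_true, PySem.Set.contains_iff]
          exact ⟨⟨ht.1, ht.2.1⟩, ht.2.2⟩
        have hng : ¬ ((5 - ((m + 1 : Nat) : Int)) + 1 > 5) := by push_cast; omega
        rw [if_pos hx, if_pos hb, if_neg hng, hn1, ih (by omega) (x + 1)]
        constructor
        · rintro ⟨h1, h2⟩
          refine ⟨by push_cast at h1 ⊢; omega, ?_⟩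
          intro k hk
          match k, hk with
          | 0, _ => simpa using ht
          | (j + 1), hk =>
            have hj := h2 j (by omega)
            have he : x + ((j + 1 : Nat) : Int) = x + 1 + (j : Int) := by push_cast; ring
            rw [he]; exact hj
        · rintro ⟨h1, h2⟩
          refine ⟨by push_cast at h1 ⊢; omega, ?_⟩
          intro k hk
          have hj := h2 (k + 1) (by omega)
          have he : x + 1 + (k : Nat) = x + ((k + 1 : Nat) : Int) := by push_cast; ring
          rw [he]; exact hj
      · have hb : ¬ ((PySem.Set.contains S (x, y) && PySem.Set.contains S (x, y - 1)
            && PySem.Set.contains S (x, y + 1)) = true) := by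
          simp only [Bool.and_eq_true, PySem.Set.contains_iff]
          intro hc; exact ht ⟨hc.1.1, hc.1.2, hc.2⟩
        rw [if_pos hx, if_neg hb]
        constructor
        · intro h; simp at h
        · rintro ⟨_, h2⟩
          exact absurd (by simpa using h2 0 (by omega)) ht
    · rw [if_neg hx]
      constructor
      · intro h; simp at h
      · rintro ⟨h1, _⟩
        exact absurd (by push_cast at h1; omega : x < w) hx

lemma pvScanA_zero_iff (S : PySem.Set (Int × Int)) (y w x : Int) :
    pvScanA S y x w 0 = true ↔
      (x + 5 < w ∧ ∀ k : Nat, k ≤ 5 → pvTriple S (x + k) y) := by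
  have h := pvScanA_iff S y w 5 (le_refl 5) x
  norm_num at h
  exact h

-- A's set-building fold equals set(zip(px, py)) when py is long enough
lemma pvBuild_eq (px py : List Int) (h : px.length ≤ py.length) :
    (PySem.List.pyRange 0 (px.length : Int) 1).foldl
      (fun s i => PySem.Set.add s (PySem.List.pyGetD px i 0, PySem.List.pyGetD py i 0))
      PySem.Set.empty = PySem.Set.ofList (px.zip py) := by
  have h1 : (PySem.List.pyRange 0 (px.length : Int) 1).map
      (fun i => (PySem.List.pyGetD px i 0, PySem.List.pyGetD py i 0)) = px.zip py := by
    rw [PySem.List.pyRange_zero_natCast, List.map_map]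
    apply List.ext_getElem
    · simp [List.length_zip]; omega
    · intro i hi1 hi2
      have hip : i < px.length := by simpa using hi1
      have hiq : i < py.length := by omega
      simp [List.getElem_zip, PySem.List.pyGetD_natCast, List.getD_eq_getElem?_getD,
        List.getElem?_eq_getElem hip, List.getElem?_eq_getElem hiq]
  calc (PySem.List.pyRange 0 (px.length : Int) 1).foldl
        (fun s i => PySem.Set.add s (PySem.List.pyGetD px i 0, PySem.List.pyGetD py i 0))
        PySem.Set.empty
      = ((PySem.List.pyRange 0 (px.length : Int) 1).map
          (fun i => (PySem.List.pyGetD px i 0, PySem.List.pyGetD py i 0))).foldl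
          PySem.Set.add PySem.Set.empty := by rw [List.foldl_map]
    _ = PySem.Set.ofList (px.zip py) := by rw [h1, PySem.Set.ofList_eq_foldl]; rfl

lemma pvTriple_ofList (l : List (Int × Int)) (x y : Int) :
    pvTriple (PySem.Set.ofList l) x y ↔ pvTriple l x y := by
  simp [pvTriple, PySem.Set.mem_ofList]

-- A = true ↔ ∃ a 6-run of triples starting before width - 5
lemma pvA_iff (px py : List Int) (w : Int) (h : px.length ≤ py.length) :
    has_many_adjacent px py w = true ↔
      ∃ x y : Int, x + 5 < w ∧ ∀ k : Nat, k ≤ 5 → pvTriple (px.zip py) (x + k) y := by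
  unfold has_many_adjacent
  rw [pvBuild_eq px py h, List.any_eq_true]
  constructor
  · rintro ⟨⟨x, y⟩, _, hscan⟩
    rw [pvScanA_zero_iff] at hscan
    exact ⟨x, y, hscan.1, fun k hk => (pvTriple_ofList _ _ _).mp (hscan.2 k hk)⟩
  · rintro ⟨x, y, hw, hk⟩
    have h0 : (x, y) ∈ px.zip py := by simpa using (hk 0 (by omega)).1
    refine ⟨(x, y), (PySem.Set.mem_ofList _ _).mpr h0, ?_⟩
    rw [pvScanA_zero_iff]
    exact ⟨hw, fun k hkk => (pvTriple_ofList _ _ _).mpr (hk k hkk)⟩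

-- === B side ===

-- rows-dict membership: x ∈ rows.getD y ∅ ↔ (x, y) in the point list
lemma pvRows_getD_aux (l : List (Int × Int)) :
    ∀ (d : PySem.Dict Int (PySem.Set Int)) (y x : Int),
      (x ∈ (l.foldl (fun d p => d.modify p.2 PySem.Set.empty (fun s => PySem.Set.add s p.1)) d).getD y PySem.Set.empty
        ↔ x ∈ d.getD y PySem.Set.empty ∨ (x, y) ∈ l) := by
  induction l with
  | nil => simp
  | cons a l ih =>
    intro d y x
    rw [List.foldl_cons, ih, PySem.Dict.getD_modify]
    by_cases hy : y = a.2
    · subst hy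
      rw [if_pos rfl]
      simp only [PySem.Set.mem_add, List.mem_cons, Prod.ext_iff]
      tauto
    · rw [if_neg hy]
      simp only [List.mem_cons, Prod.ext_iff]
      tauto

lemma pvRows_getD (px py : List Int) (y x : Int) :
    x ∈ (pvRows px py).getD y PySem.Set.empty ↔ (x, y) ∈ px.zip py := by
  unfold pvRows
  rw [pvRows_getD_aux (px.zip py) PySem.Dict.empty y x]
  simp [PySem.Dict.getD_empty, PySem.Set.empty]

-- the stored sets are duplicate-free
lemma pvRows_nodup_aux (l : List (Int × Int)) :
    ∀ (d : PySem.Dict Int (PySem.Set Int)),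
      (∀ y : Int, (d.getD y PySem.Set.empty).Nodup) →
      ∀ y : Int, ((l.foldl (fun d p => d.modify p.2 PySem.Set.empty (fun s => PySem.Set.add s p.1)) d).getD y PySem.Set.empty).Nodup := by
  induction l with
  | nil => intro d h y; exact h y
  | cons a l ih =>
    intro d h y
    rw [List.foldl_cons]
    refine ih _ (fun z => ?_) y
    rw [PySem.Dict.getD_modify]
    by_cases hz : z = a.2
    · rw [if_pos hz]; exact PySem.Set.nodup_add _ _ (h a.2)
    · rw [if_neg hz]; exact h z

lemma pvRows_nodup (px py : List Int) (y : Int) :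
    ((pvRows px py).getD y PySem.Set.empty).Nodup := by
  unfold pvRows
  refine pvRows_nodup_aux (px.zip py) PySem.Dict.empty (fun z => ?_) y
  rw [PySem.Dict.getD_empty]
  exact List.nodup_nil

lemma pvRows_keys (px py : List Int) :
    (pvRows px py).keys = PySem.Set.ofList ((px.zip py).map Prod.snd) := by
  unfold pvRows
  rw [PySem.Dict.keys_foldl_modify_key (key := Prod.snd)]
  rw [PySem.Dict.keys_empty, PySem.Set.update_nil_left]

lemma pvRows_keys_nodup (px py : List Int) : (pvRows px py).keys.Nodup := by
  rw [pvRows_keys]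
  exact PySem.Set.nodup_ofList _

-- the prev/run sweep finds a run of 6 consecutive values: main invariant.
-- The window (p - run, p] is the run of consecutive columns credited so far.
lemma pvRunScan_iff (l : List Int) : l.Pairwise (· < ·) →
    ∀ (run : Int) (p : Int), 1 ≤ run → run ≤ 5 → (∀ b ∈ l, p < b) →
      (pvRunScan l run (some p) = true ↔
        ∃ x : Int, ∀ k : Nat, k ≤ 5 →
          ((x + k) ∈ l ∨ (p - run < x + k ∧ x + k ≤ p))) := by
  induction l with
  | nil =>
    intro _ run p h1 h5 _
    constructor
    · intro h; simp [pvRunScan] at h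
    · rintro ⟨x, hx⟩
      have h0 := hx 0 (by omega)
      have hlast := hx 5 (by omega)
      simp only [List.not_mem_nil, false_or] at h0 hlast
      push_cast at h0 hlast
      omega
  | cons a rest ih =>
    intro hs run p h1 h5 hgt
    have hp : p < a := hgt a (List.mem_cons_self)
    have hrest : ∀ b ∈ rest, a < b := (List.pairwise_cons.mp hs).1
    have hs' : rest.Pairwise (· < ·) := (List.pairwise_cons.mp hs).2
    have hred : pvRunScan (a :: rest) run (some p) =
        (if (if a == p + 1 then run + 1 else 1) ≥ 6 then true
         else pvRunScan rest (if a == p + 1 then run + 1 else 1) (some a)) := rfl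
    by_cases ha : a = p + 1
    · have hbeq : (a == p + 1) = true := by simp [ha]
      rw [hred, hbeq]
      simp only [if_true]
      by_cases h6 : run + 1 ≥ 6
      · rw [if_pos h6]
        constructor
        · intro _
          refine ⟨p - 4, fun k hk => ?_⟩
          by_cases hk5 : k = 5
          · subst hk5
            left
            have he : p - 4 + ((5 : Nat) : Int) = a := by push_cast; omega
            rw [he]
            exact List.mem_cons_self
          · right; omega
        · intro _; rfl
      · rw [if_neg h6, ih hs' (run + 1) a (by omega) (by omega) hrest]
        constructor
        · rintro ⟨x, hx⟩
          refine ⟨x, fun k hk => ?_⟩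
          rcases hx k hk with hm | hw
          · exact Or.inl (List.mem_cons_of_mem _ hm)
          · by_cases hle : x + (k : Int) ≤ p
            · right; omega
            · left
              have he : x + (k : Int) = a := by omega
              rw [he]
              exact List.mem_cons_self
        · rintro ⟨x, hx⟩
          refine ⟨x, fun k hk => ?_⟩
          rcases hx k hk with hm | hw
          · rcases List.mem_cons.mp hm with he | hm'
            · right; omega
            · exact Or.inl hm'
          · right; omega
    · have hbeq : (a == p + 1) = false := by simp [ha]
      rw [hred, hbeq]
      simp only [Bool.false_eq_true, if_false]
      rw [if_neg (by omega : ¬ ((1 : Int) ≥ 6)),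
        ih hs' 1 a (by omega) (by omega) hrest]
      have ha2 : p + 2 ≤ a := by omega
      constructor
      · rintro ⟨x, hx⟩
        refine ⟨x, fun k hk => ?_⟩
        rcases hx k hk with hm | hw
        · exact Or.inl (List.mem_cons_of_mem _ hm)
        · left
          have he : x + (k : Int) = a := by omega
          rw [he]
          exact List.mem_cons_self
      · rintro ⟨x, hx⟩
        by_cases hall : ∀ k : Nat, k ≤ 5 → p < x + (k : Int)
        · refine ⟨x, fun k hk => ?_⟩
          rcases hx k hk with hm | hw
          · rcases List.mem_cons.mp hm with he | hm'
            · right; omega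
            · exact Or.inl hm'
          · exact absurd hw (by have := hall k hk; omega)
        · exfalso
          push_neg at hall
          obtain ⟨k0, hk00, hle0⟩ := hall
          have hx0 : x ≤ p := by
            have : (0 : Int) ≤ (k0 : Int) := by positivity
            omega
          have h5p : p < x + 5 := by
            by_contra hnp
            push_neg at hnp
            have hw0 : p - run < x + ((0 : Nat) : Int) ∧ x + ((0 : Nat) : Int) ≤ p := by
              rcases hx 0 (by omega) with hm | hw
              · have := hgt _ hm; push_cast at this; omega
              · exact hw
            have hw5 : p - run < x + ((5 : Nat) : Int) ∧ x + ((5 : Nat) : Int) ≤ p := by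
              rcases hx 5 (by omega) with hm | hw
              · have := hgt _ hm; push_cast at this; omega
              · exact hw
            push_cast at hw0 hw5
            omega
          have hk1nn : (0 : Int) ≤ p + 1 - x := by omega
          have hk1c : (((p + 1 - x).toNat : Nat) : Int) = p + 1 - x := Int.toNat_of_nonneg hk1nn
          have hk15 : (p + 1 - x).toNat ≤ 5 := by omega
          have he : x + (((p + 1 - x).toNat : Nat) : Int) = p + 1 := by omega
          rcases hx (p + 1 - x).toNat hk15 with hm | hw
          · rw [he] at hm
            rcases List.mem_cons.mp hm with h | h
            · omega
            · have := hrest _ h; omega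
          · omega

lemma pvRunScan_start (l : List Int) (hs : l.Pairwise (· < ·)) :
    pvRunScan l 0 none = true ↔ ∃ x : Int, ∀ k : Nat, k ≤ 5 → (x + k) ∈ l := by
  cases l with
  | nil =>
    constructor
    · intro h; simp [pvRunScan] at h
    · rintro ⟨x, hx⟩
      simpa using hx 0 (by omega)
  | cons a rest =>
    have hred : pvRunScan (a :: rest) 0 none = pvRunScan rest 1 (some a) := rfl
    rw [hred, pvRunScan_iff rest (List.pairwise_cons.mp hs).2 1 a (by omega) (by omega)
      (List.pairwise_cons.mp hs).1]
    constructor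
    · rintro ⟨x, hx⟩
      refine ⟨x, fun k hk => ?_⟩
      rcases hx k hk with hm | hw
      · exact List.mem_cons_of_mem _ hm
      · have he : x + (k : Int) = a := by omega
        rw [he]
        exact List.mem_cons_self
    · rintro ⟨x, hx⟩
      refine ⟨x, fun k hk => ?_⟩
      rcases List.mem_cons.mp (hx k hk) with he | hm
      · right; omega
      · exact Or.inl hm

-- one row of B: the sorted-filtered column sweep finds a 6-run of good columns
lemma pvCols_iff (px py : List Int) (w : Int) (it : Int × PySem.Set Int)
    (hit : it ∈ (pvRows px py).items) :
    (pvRunScan (PySem.List.sorted (it.2.filter (fun x =>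
        decide (x < w)
          && PySem.Set.contains ((pvRows px py).getD (it.1 - 1) PySem.Set.empty) x
          && PySem.Set.contains ((pvRows px py).getD (it.1 + 1) PySem.Set.empty) x))
      (fun x => x) false) 0 none = true) ↔
    ∃ x : Int, ∀ k : Nat, k ≤ 5 →
      ((x + k, it.1) ∈ px.zip py ∧ x + k < w ∧
        (x + k, it.1 - 1) ∈ px.zip py ∧ (x + k, it.1 + 1) ∈ px.zip py) := by
  have hxs : (pvRows px py).getD it.1 PySem.Set.empty = it.2 :=
    PySem.Dict.getD_of_mem_items (pvRows px py) (by simpa using hit) (pvRows_keys_nodup px py) PySem.Set.empty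
  have hmem : ∀ u : Int,
      (u ∈ PySem.List.sorted (it.2.filter (fun x =>
          decide (x < w)
            && PySem.Set.contains ((pvRows px py).getD (it.1 - 1) PySem.Set.empty) x
            && PySem.Set.contains ((pvRows px py).getD (it.1 + 1) PySem.Set.empty) x))
        (fun x => x) false) ↔
      ((u, it.1) ∈ px.zip py ∧ u < w ∧
        (u, it.1 - 1) ∈ px.zip py ∧ (u, it.1 + 1) ∈ px.zip py) := by
    intro u
    rw [PySem.List.mem_sorted, List.mem_filter]
    simp only [Bool.and_eq_true, decide_eq_true_eq, PySem.Set.contains_iff]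
    rw [← hxs, pvRows_getD, pvRows_getD, pvRows_getD]
    tauto
  have hnd : (it.2.filter (fun x =>
      decide (x < w)
        && PySem.Set.contains ((pvRows px py).getD (it.1 - 1) PySem.Set.empty) x
        && PySem.Set.contains ((pvRows px py).getD (it.1 + 1) PySem.Set.empty) x)).Nodup := by
    refine List.Nodup.filter _ ?_
    rw [← hxs]
    exact pvRows_nodup px py it.1
  have hsorted : (PySem.List.sorted (it.2.filter (fun x =>
      decide (x < w)
        && PySem.Set.contains ((pvRows px py).getD (it.1 - 1) PySem.Set.empty) x
        && PySem.Set.contains ((pvRows px py).getD (it.1 + 1) PySem.Set.empty) x))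
      (fun x => x) false).Pairwise (· < ·) := by
    have h1 := PySem.List.sorted_pairwise (xs := it.2.filter (fun x =>
      decide (x < w)
        && PySem.Set.contains ((pvRows px py).getD (it.1 - 1) PySem.Set.empty) x
        && PySem.Set.contains ((pvRows px py).getD (it.1 + 1) PySem.Set.empty) x))
      (key := fun x => x)
    have h2 : (PySem.List.sorted (it.2.filter (fun x =>
        decide (x < w)
          && PySem.Set.contains ((pvRows px py).getD (it.1 - 1) PySem.Set.empty) x
          && PySem.Set.contains ((pvRows px py).getD (it.1 + 1) PySem.Set.empty) x))
        (fun x => x) false).Nodup :=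
      (PySem.List.sorted_perm _ _ _).nodup_iff.mpr hnd
    exact (h1.and h2).imp (fun h => lt_of_le_of_ne h.1 h.2)
  rw [pvRunScan_start _ hsorted]
  constructor
  · rintro ⟨x, hx⟩
    exact ⟨x, fun k hk => (hmem _).mp (hx k hk)⟩
  · rintro ⟨x, hx⟩
    exact ⟨x, fun k hk => (hmem _).mpr (hx k hk)⟩

-- B = true ↔ the same 6-run condition
lemma pvB_iff (px py : List Int) (w : Int) :
    has_many_adjacent_alt px py w = true ↔
      ∃ x y : Int, ∀ k : Nat, k ≤ 5 →
        ((x + k, y) ∈ px.zip py ∧ x + k < w ∧ (x + k, y - 1) ∈ px.zip py ∧ (x + k, y + 1) ∈ px.zip py) := by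
  have hres : has_many_adjacent_alt px py w =
      (pvRows px py).items.any (fun it =>
        pvRunScan (PySem.List.sorted (it.2.filter (fun x =>
            decide (x < w)
              && PySem.Set.contains ((pvRows px py).getD (it.1 - 1) PySem.Set.empty) x
              && PySem.Set.contains ((pvRows px py).getD (it.1 + 1) PySem.Set.empty) x))
          (fun x => x) false) 0 none) := rfl
  rw [hres, List.any_eq_true]
  constructor
  · rintro ⟨it, hit, hrun⟩
    obtain ⟨x, hx⟩ := (pvCols_iff px py w it hit).mp hrun
    exact ⟨x, it.1, hx⟩
  · rintro ⟨x, y, hC⟩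
    have h0 : (x + ((0 : Nat) : Int), y) ∈ px.zip py := (hC 0 (by omega)).1
    have hy : y ∈ (pvRows px py).keys := by
      rw [pvRows_keys, PySem.Set.mem_ofList]
      exact List.mem_map.mpr ⟨(x + ((0 : Nat) : Int), y), h0, rfl⟩
    have hy' : y ∈ (pvRows px py).items.map Prod.fst := by
      simpa [PySem.Dict.keys] using hy
    obtain ⟨it, hit, hity⟩ := List.mem_map.mp hy'
    subst hity
    exact ⟨it, hit, (pvCols_iff px py w it hit).mpr ⟨x, hC⟩⟩

-- ===== VERDICT (by name: the statement is the Claim_ definition above) =====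
theorem has_many_adjacent_spec : Claim_equal_has_many_adjacent := by
  intro px py w _ hpre
  unfold Spec_has_many_adjacent
  rw [Bool.eq_iff_iff, pvA_iff px py w hpre, pvB_iff px py w]
  constructor
  · rintro ⟨x, y, hw, hk⟩
    refine ⟨x, y, fun k hk5 => ?_⟩
    obtain ⟨h1, h2, h3⟩ := hk k hk5
    exact ⟨h1, by omega, h2, h3⟩
  · rintro ⟨x, y, hk⟩
    refine ⟨x, y, ?_, fun k hk5 => ?_⟩
    · have := (hk 5 (by omega)).2.1
      push_cast at this ⊢; omega
    · obtain ⟨h1, _, h2, h3⟩ := hk k hk5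
      exact ⟨h1, h2, h3⟩
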